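-- pv_equiv track=rewrite | github.com/mattdesl/pigments | scripts/polynomial-train.py | generate_multiindices
-- ===== SOURCE A (Python) =====
-- def generate_multiindices(n_vars, max_degree):
--     """
--     Generate all exponent tuples for n_vars variables with total degree <= max_degree.
--     Returns a list of tuples of length n_vars.
--     """
--     # This uses a simple recursion.
--     def rec(n, d):
--         if n == 1:
--             yield (d,)
--         else:
--             for i in range(d + 1):
--                 for tail in rec(n - 1, d - i):
--                     yield (i,) + tail
--     multiindices = []
--     for total_degree in range(max_degree + 1):
--         multiindices.extend(list(rec(n_vars, total_degree)))
--     return multiindices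
-- ===== SOURCE B (Python) =====
-- def generate_multiindices(n_vars, max_degree):
--     """
--     Generate all exponent tuples for n_vars variables with total degree <= max_degree.
--     Iterative bottom-up DP over the number of variables instead of per-degree recursion:
--     table[d] holds all tuples of the current arity with total degree exactly d.
--     """
--     if max_degree < 0:
--         return []
--     degrees = range(max_degree + 1)
--     table = [[(d,)] for d in degrees]          # tuples with 1 variable
--     for _ in range(n_vars - 1):
--         table = [[(i,) + t for i in range(d + 1) for t in table[d - i]]
--                  for d in degrees]
--     result = []
--     for row in table:
--         result.extend(row)
--     return result
-- ===== Notes on version B (the rewrite author's own statement) =====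
-- stated objective: alternative
-- what changed: Replaces the per-degree recursive generator (rec over n with generator concatenation) by an iterative bottom-up DP: a table indexed by exact degree is extended one variable at a time, then concatenated.
import Mathlib
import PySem

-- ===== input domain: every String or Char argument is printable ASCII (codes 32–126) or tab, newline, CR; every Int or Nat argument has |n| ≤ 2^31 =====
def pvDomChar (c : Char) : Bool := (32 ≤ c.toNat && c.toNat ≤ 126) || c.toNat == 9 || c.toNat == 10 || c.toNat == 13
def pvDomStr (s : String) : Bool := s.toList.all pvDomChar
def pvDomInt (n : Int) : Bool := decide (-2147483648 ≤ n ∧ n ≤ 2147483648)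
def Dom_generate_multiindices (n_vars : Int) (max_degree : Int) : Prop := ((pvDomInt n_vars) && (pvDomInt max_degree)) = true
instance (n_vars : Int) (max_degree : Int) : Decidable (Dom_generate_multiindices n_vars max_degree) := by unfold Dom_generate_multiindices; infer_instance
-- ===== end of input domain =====

-- B replaces A's per-degree recursive generator by an iterative DP table extended one variable at a time (objective: alternative).

-- ===== PORT A =====
-- rec(n, d) of A, with n carried as a Nat (A is only called with n = n_vars; for
-- n_vars ≤ 0 the Python recursion diverges with a RecursionError, which Pre_ excludes,
-- so the value returned at fuel 0 is never claimed about).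
def pvRecA : Nat → Int → List (List Int)
  | 0, _ => []
  | 1, d => [[d]]
  | (n+2), d =>
      (PySem.List.pyRange 0 (d+1) 1).flatMap (fun i =>
        (pvRecA (n+1) (d-i)).map (fun t => i :: t))

def generate_multiindices (n_vars : Int) (max_degree : Int) : List (List Int) :=
  (PySem.List.pyRange 0 (max_degree+1) 1).foldl
    (fun acc td => acc ++ pvRecA n_vars.toNat td) []

-- ===== PORT B =====
-- one pass of B's inner comprehension: table[d] = [(i,)+t for i in range(d+1) for t in table[d-i]]
-- (the list index d-i is always in range when d is in range, so .getD [] is exact there)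
def pvAltStep (max_degree : Int) (table : List (List (List Int))) : List (List (List Int)) :=
  (PySem.List.pyRange 0 (max_degree+1) 1).map (fun d =>
    (PySem.List.pyRange 0 (d+1) 1).flatMap (fun i =>
      (PySem.List.pyGetD table (d-i) []).map (fun t => i :: t)))

def generate_multiindices_alt (n_vars : Int) (max_degree : Int) : List (List Int) :=
  if max_degree < 0 then [] else
  let init := (PySem.List.pyRange 0 (max_degree+1) 1).map (fun d => [[d]])
  let table := (PySem.List.pyRange 0 (n_vars - 1) 1).foldl
    (fun tb _ => pvAltStep max_degree tb) init
  table.foldl (fun acc row => acc ++ row) []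

-- ===== PRECONDITION & SPEC =====
-- Pre_ excludes exactly the inputs where A raises RecursionError: n_vars ≤ 0 with
-- max_degree ≥ 0 (rec is then invoked and never terminates).
def Pre_generate_multiindices (n_vars : Int) (max_degree : Int) : Prop :=
  1 ≤ n_vars ∨ max_degree < 0
instance (n_vars : Int) (max_degree : Int) : Decidable (Pre_generate_multiindices n_vars max_degree) := by unfold Pre_generate_multiindices; infer_instance

def pvWitness_generate_multiindices : Int × Int := (2, 2)

def Spec_generate_multiindices (n_vars : Int) (max_degree : Int) (out : List (List Int)) : Prop := out = generate_multiindices_alt n_vars max_degree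
instance (n_vars : Int) (max_degree : Int) (out : List (List Int)) : Decidable (Spec_generate_multiindices n_vars max_degree out) := by unfold Spec_generate_multiindices; infer_instance

-- ===== CLAIM (what is proved, stated in full; the proofs are below) =====
def Claim_equal_generate_multiindices : Prop := ∀ (n_vars : Int) (max_degree : Int), Dom_generate_multiindices n_vars max_degree → Pre_generate_multiindices n_vars max_degree → Spec_generate_multiindices n_vars max_degree (generate_multiindices n_vars max_degree)

-- ===== LEMMAS AND PROOFS =====

-- folding a constant-step function over a list is iteration by its length
theorem pv_foldl_const {α β : Type} (f : α → α) (l : List β) (x : α) :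
    l.foldl (fun a _ => f a) x = f^[l.length] x := by
  induction l generalizing x with
  | nil => rfl
  | cons b bs ih => simp [List.foldl, ih, Function.iterate_succ_apply]

-- the table after k DP steps holds pvRecA (k+1) at every degree slot
theorem pv_table_inv (max_degree : Int) (k : Nat) :
    (pvAltStep max_degree)^[k]
        ((PySem.List.pyRange 0 (max_degree+1) 1).map (fun d => [[d]]))
      = (PySem.List.pyRange 0 (max_degree+1) 1).map (fun d => pvRecA (k+1) d) := by
  induction k with
  | zero => simp [pvRecA]
  | succ k ih =>
      rw [Function.iterate_succ_apply', ih]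
      unfold pvAltStep
      apply List.map_congr_left
      intro d hd
      rw [PySem.List.mem_pyRange_one] at hd
      show _ = pvRecA (k+1+1) d
      have hrec : pvRecA (k+1+1) d
          = (PySem.List.pyRange 0 (d+1) 1).flatMap (fun i =>
              (pvRecA (k+1) (d-i)).map (fun t => i :: t)) := rfl
      rw [hrec]
      apply List.flatMap_congr  -- congruence over i ∈ range(d+1)
      intro i hi
      rw [PySem.List.mem_pyRange_one] at hi
      have h1 : (0:Int) ≤ d - i := by omega
      have h2 : d - i < max_degree + 1 := by omega
      rw [PySem.List.pyGetD_map_pyRange_of_nonneg (fun d => pvRecA (k+1) d)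
            (max_degree+1) (d-i) [] h1 h2]

theorem pv_foldl_append_id (l : List (List (List Int))) (acc : List (List Int)) :
    l.foldl (fun acc row => acc ++ row) acc = acc ++ l.flatMap id := by
  induction l generalizing acc with
  | nil => simp
  | cons x xs ih => simp [List.foldl, ih]

theorem pv_main (n_vars max_degree : Int) (h : 1 ≤ n_vars) (hm : 0 ≤ max_degree) :
    generate_multiindices n_vars max_degree
      = generate_multiindices_alt n_vars max_degree := by
  unfold generate_multiindices generate_multiindices_alt
  rw [if_neg (by omega : ¬ max_degree < 0)]
  dsimp only
  rw [PySem.List.foldl_append_eq_flatMap, pv_foldl_const, pv_foldl_append_id,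
      PySem.List.length_pyRange_one]
  simp only [Int.sub_zero, List.nil_append]
  rw [pv_table_inv, List.flatMap_map]
  have : n_vars.toNat = (n_vars - 1).toNat + 1 := by omega
  rw [this]
  simp

theorem pv_neg (n_vars max_degree : Int) (h : max_degree < 0) :
    generate_multiindices n_vars max_degree
      = generate_multiindices_alt n_vars max_degree := by
  unfold generate_multiindices generate_multiindices_alt
  rw [if_pos h]
  have he : PySem.List.pyRange 0 (max_degree+1) 1 = [] := by
    rw [PySem.List.pyRange_one]
    have : (max_degree + 1 - 0).toNat = 0 := by omega
    rw [this]
    rfl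
  rw [he]
  rfl

-- ===== VERDICT (by name: the statement is the Claim_ definition above) =====
theorem generate_multiindices_spec : Claim_equal_generate_multiindices := by
  intro n_vars max_degree _ hpre
  unfold Spec_generate_multiindices
  by_cases hm : max_degree < 0
  · exact pv_neg n_vars max_degree hm
  · rcases hpre with h | h
    · exact pv_main n_vars max_degree h (by omega)
    · exact absurd h hm
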